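-- pv_equiv track=rewrite | github.com/mirimSunwoo/sunwoo-coding-test-study | COSPro/practice8.py | solution
-- ===== SOURCE A (Python) =====
-- def solution(sentence):
--     filtered = []
--     for s in sentence:
--         if s != ' ' and s  != '.':
--             filtered.append(s)
--     before = ''.join(filtered)
--     filtered.reverse()
--     after = ''.join(filtered)
--     return before == after
-- ===== SOURCE B (Python) =====
-- def solution(sentence):
--     i, j = 0, len(sentence) - 1
--     while i < j:
--         if sentence[i] in ' .':
--             i += 1
--         elif sentence[j] in ' .':
--             j -= 1
--         elif sentence[i] != sentence[j]:
--             return False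
--         else:
--             i += 1
--             j -= 1
--     return True
-- ===== Notes on version B (the rewrite author's own statement) =====
-- stated objective: faster
-- what changed: B is an in-place two-pointer scan that skips spaces/periods from both ends and compares characters directly, instead of building a filtered list, joining, reversing and comparing whole strings.
import Mathlib
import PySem

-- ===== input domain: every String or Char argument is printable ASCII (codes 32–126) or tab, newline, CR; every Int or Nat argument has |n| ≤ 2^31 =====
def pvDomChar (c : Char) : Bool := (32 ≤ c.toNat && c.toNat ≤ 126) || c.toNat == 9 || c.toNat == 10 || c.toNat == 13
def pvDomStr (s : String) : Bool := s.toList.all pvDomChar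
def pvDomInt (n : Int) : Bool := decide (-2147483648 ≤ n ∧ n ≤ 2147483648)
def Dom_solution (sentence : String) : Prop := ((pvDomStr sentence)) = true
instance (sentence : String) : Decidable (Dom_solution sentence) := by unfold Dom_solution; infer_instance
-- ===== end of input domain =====

-- B replaces A's filter/join/reverse/compare pipeline with an in-place two-pointer scan that
-- skips spaces and periods from both ends (objective: faster — a timing run measured it).

-- ===== PORT A =====
def solution (sentence : String) : Bool :=
  -- filtered = []; for s in sentence: if s != ' ' and s != '.': filtered.append(s)
  let filtered : List Char :=
    sentence.toList.foldl (fun acc s => if s != ' ' && s != '.' then acc ++ [s] else acc) []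
  let before := String.ofList filtered
  let after := String.ofList filtered.reverse
  before == after

-- ===== PORT B =====
-- the while loop of Source B: i advances, j retreats; sentence[i]/sentence[j] are always
-- in range when read (0 ≤ i < j ≤ len-1), so List.getD is exact here
def pvLoop (cs : List Char) (i j : Nat) : Bool :=
  if _h : i < j then
    let ci := cs.getD i ' '
    let cj := cs.getD j ' '
    if ci == ' ' || ci == '.' then pvLoop cs (i + 1) j
    else if cj == ' ' || cj == '.' then pvLoop cs i (j - 1)
    else if ci != cj then false
    else pvLoop cs (i + 1) (j - 1)
  else true
termination_by j - i
decreasing_by all_goals omega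

def solution_alt (sentence : String) : Bool :=
  pvLoop sentence.toList 0 (sentence.length - 1)

-- ===== PRECONDITION & SPEC =====
def Spec_solution (sentence : String) (out : Bool) : Prop := out = solution_alt sentence
instance (sentence : String) (out : Bool) : Decidable (Spec_solution sentence out) := by unfold Spec_solution; infer_instance

-- ===== CLAIM (what is proved, stated in full; the proofs are below) =====
def Claim_equal_solution : Prop := ∀ (sentence : String), Dom_solution sentence → Spec_solution sentence (solution sentence)

-- ===== LEMMAS AND PROOFS =====

-- A's keep-predicate
def pvKeep (c : Char) : Bool := c != ' ' && c != '.'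

-- "the filtered list is a palindrome", as A computes it
def pvPalCheck (l : List Char) : Bool := (l.filter pvKeep) == (l.filter pvKeep).reverse

theorem pvList_beq_eq_decide (a b : List Char) : (a == b) = decide (a = b) := by
  rw [Bool.eq_iff_iff]; simp

theorem pvPalCheck_small {l : List Char} (h : l.length ≤ 1) : pvPalCheck l = true := by
  unfold pvPalCheck
  have hf : (l.filter pvKeep).length ≤ 1 := le_trans (List.length_filter_le _ _) h
  have : (l.filter pvKeep).reverse = l.filter pvKeep := by
    match hl : l.filter pvKeep with
    | [] => rfl
    | [a] => rfl
    | a :: b :: t => rw [hl] at hf; simp at hf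
  rw [this]; simp

theorem pvPalCheck_cons_skip {c : Char} (hc : pvKeep c = false) (t : List Char) :
    pvPalCheck (c :: t) = pvPalCheck t := by
  unfold pvPalCheck; rw [List.filter_cons_of_neg (by simp [hc])]

theorem pvPalCheck_concat_skip {d : Char} (hd : pvKeep d = false) (m : List Char) :
    pvPalCheck (m ++ [d]) = pvPalCheck m := by
  unfold pvPalCheck
  simp [List.filter_append, List.filter_singleton, hd]

theorem pvPalCheck_both {c d : Char} (hc : pvKeep c = true) (hd : pvKeep d = true)
    (m : List Char) :
    pvPalCheck (c :: m ++ [d]) = ((c == d) && pvPalCheck m) := by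
  unfold pvPalCheck
  rw [show c :: m ++ [d] = (c :: m) ++ [d] from rfl, List.filter_append,
      List.filter_cons_of_pos hc, List.filter_singleton, hd]
  simp only [cond_true]
  set F := m.filter pvKeep with hF
  rw [pvList_beq_eq_decide, pvList_beq_eq_decide]
  have : (c == d) = decide (c = d) := by rw [Bool.eq_iff_iff]; simp
  rw [this, ← Bool.decide_and, decide_eq_decide]
  constructor
  · intro h
    have hrev : (c :: F ++ [d]).reverse = d :: (F.reverse ++ [c]) := by simp
    rw [hrev] at h
    injection h with hcd h2
    subst hcd
    exact ⟨rfl, (List.append_left_inj _).mp h2⟩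
  · rintro ⟨hcd, hm⟩
    subst hcd
    have hrev : (c :: F ++ [c]).reverse = c :: (F.reverse ++ [c]) := by simp
    rw [hrev, ← hm]
    simp

-- the segment the two pointers are working on
def pvSeg (cs : List Char) (i j : Nat) : List Char := (cs.take (j + 1)).drop i

theorem pvSeg_cons {cs : List Char} {i j : Nat} (hij : i ≤ j) (hj : j < cs.length) :
    pvSeg cs i j = cs[i]'(by omega) :: pvSeg cs (i + 1) j := by
  unfold pvSeg
  have hi : i < (cs.take (j + 1)).length := by simp; omega
  rw [List.drop_eq_getElem_cons hi, List.getElem_take]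

theorem pvSeg_concat {cs : List Char} {i j : Nat} (hij : i ≤ j) (hj1 : 1 ≤ j)
    (hj : j < cs.length) :
    pvSeg cs i j = pvSeg cs i (j - 1) ++ [cs[j]'hj] := by
  unfold pvSeg
  have h1 : cs.take (j + 1) = cs.take j ++ [cs[j]'hj] := by
    rw [List.take_succ]; simp [List.getElem?_eq_getElem hj]
  rw [h1, List.drop_append]
  have h2 : (cs.take j).length = j := by simp; omega
  rw [h2, show j - 1 + 1 = j from by omega, show i - j = 0 from by omega]
  simp

theorem pvLoop_eq_palCheck (cs : List Char) :
    ∀ (n i j : Nat), j - i ≤ n → j < cs.length →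
      pvLoop cs i j = pvPalCheck (pvSeg cs i j) := by
  intro n
  induction n with
  | zero =>
    intro i j hn hj
    have : ¬ i < j := by omega
    rw [pvLoop, dif_neg this]
    have : (pvSeg cs i j).length ≤ 1 := by
      unfold pvSeg; simp; omega
    rw [pvPalCheck_small this]
  | succ n ih =>
    intro i j hn hj
    by_cases hij : i < j
    · have hi : i < cs.length := by omega
      have hgi : cs.getD i ' ' = cs[i]'hi := List.getD_eq_getElem cs ' ' hi
      have hgj : cs.getD j ' ' = cs[j]'hj := List.getD_eq_getElem cs ' ' hj
      rw [pvLoop, dif_pos hij]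
      simp only [hgi, hgj]
      by_cases hskipi : (cs[i]'hi == ' ' || cs[i]'hi == '.') = true
      · rw [if_pos hskipi]
        have hkeep : pvKeep (cs[i]'hi) = false := by
          unfold pvKeep; rcases Bool.or_eq_true_iff.mp hskipi with h | h <;> simp_all
        rw [ih (i + 1) j (by omega) hj, pvSeg_cons (cs := cs) (i := i) (j := j) (by omega) hj,
            pvPalCheck_cons_skip hkeep]
      · rw [if_neg hskipi]
        have hkeepi : pvKeep (cs[i]'hi) = true := by
          unfold pvKeep; simp only [Bool.or_eq_true_iff] at hskipi; push_neg at hskipi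
          simp_all
        by_cases hskipj : (cs[j]'hj == ' ' || cs[j]'hj == '.') = true
        · rw [if_pos hskipj]
          have hkeep : pvKeep (cs[j]'hj) = false := by
            unfold pvKeep; rcases Bool.or_eq_true_iff.mp hskipj with h | h <;> simp_all
          rw [ih i (j - 1) (by omega) (by omega),
              pvSeg_concat (cs := cs) (i := i) (j := j) (by omega) (by omega) hj,
              pvPalCheck_concat_skip hkeep]
        · rw [if_neg hskipj]
          have hkeepj : pvKeep (cs[j]'hj) = true := by
            unfold pvKeep; simp only [Bool.or_eq_true_iff] at hskipj; push_neg at hskipj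
            simp_all
          have hdecomp : pvSeg cs i j
              = cs[i]'hi :: pvSeg cs (i + 1) (j - 1) ++ [cs[j]'hj] := by
            rw [pvSeg_cons (cs := cs) (i := i) (j := j) (by omega) hj,
                pvSeg_concat (cs := cs) (i := i + 1) (j := j) (by omega) (by omega) hj]
            simp
          rw [hdecomp, pvPalCheck_both hkeepi hkeepj]
          by_cases hne : (cs[i]'hi != cs[j]'hj) = true
          · rw [if_pos hne]
            have : (cs[i]'hi == cs[j]'hj) = false := by
              simpa [bne] using hne
            rw [this]; simp
          · rw [if_neg hne]
            have : (cs[i]'hi == cs[j]'hj) = true := by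
              simpa [bne] using hne
            rw [this, ih (i + 1) (j - 1) (by omega) (by omega)]
            simp
    · rw [pvLoop, dif_neg hij]
      have : (pvSeg cs i j).length ≤ 1 := by unfold pvSeg; simp; omega
      rw [pvPalCheck_small this]

theorem pvSolution_eq_palCheck (s : String) : solution s = pvPalCheck s.toList := by
  unfold solution pvPalCheck
  have hfold : s.toList.foldl
      (fun acc c => if c != ' ' && c != '.' then acc ++ [c] else acc) []
      = s.toList.filter pvKeep := by
    simpa [pvKeep] using PySem.List.foldl_append_if_eq_filter pvKeep s.toList []
  simp only [hfold]
  rw [Bool.eq_iff_iff]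
  simp [String.ofList_inj]

-- ===== VERDICT (by name: the statement is the Claim_ definition above) =====
theorem solution_spec : Claim_equal_solution := by
  intro s _
  unfold Spec_solution solution_alt
  rw [pvSolution_eq_palCheck]
  have hlen : s.length = s.toList.length := by simp
  rcases hcs : s.toList with _ | ⟨c, t⟩
  · rw [hlen, hcs, pvLoop]
    simp [pvPalCheck]
  · have hj : s.length - 1 = t.length := by rw [hlen, hcs]; simp
    rw [hj,
        pvLoop_eq_palCheck (c :: t) t.length 0 t.length (by omega) (by simp)]
    have : pvSeg (c :: t) 0 t.length = c :: t := by
      unfold pvSeg; simp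
    rw [this]
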